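-- pv_equiv track=rewrite | github.com/linacastaneda/QUIZAFD | AFD.py | analizar_lexico
-- ===== SOURCE A (Python) =====
-- def analizar_lexico(texto):
--     """funcion que realiza el analisis lexico del texto.
--
--     parametros:
--     texto: cadena de entrada que sera analizada caracter por caracter
--
--     variables internas:
--     i: indice entero que recorre la cadena
--     n: longitud de la cadena
--     tokens_encontrados: lista donde se almacenan los tokens detectados
--
--     retorna:
--     lista de tokens o None si se encuentra un caracter no valido
--     """
--     i = 0
--     n = len(texto)
--     tokens_encontrados = []
--
--     while i < n:  # recorrer mientras queden caracteres
--         char = texto[i]  # caracter actual en la posicion i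
--
--         # si el caracter es espacio en blanco, avanzar
--         if char.isspace():
--             i += 1
--             continue
--
--         # detectar suma (+) o incremento (++)
--         if char == '+':
--             # si el siguiente caracter tambien es '+', es incremento
--             if i + 1 < n and texto[i+1] == '+':
--                 tokens_encontrados.append("INCR")  # token de incremento
--                 i += 2  # saltar los dos signos ++
--             else:
--                 tokens_encontrados.append("SUMA")  # token de suma simple
--                 i += 1  # avanzar un caracter
--             continue
--
--         # detectar identificadores que empiezan con mayuscula A-Z
--         if 'A' <= char <= 'Z':
--             i += 1  # consumir la letra inicial
--             # mientras sigan minusculas o numeros, continuar consumiendo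
--             while i < n and (('a' <= texto[i] <= 'z') or ('0' <= texto[i] <= '9')):
--                 i += 1
--             tokens_encontrados.append("ID")  # token identificador
--             continue
--
--         # si se alcanza un caracter no esperado, devolver error (None)
--         return None
--
--     return tokens_encontrados  # devolver la lista de tokens reconocidos
-- ===== SOURCE B (Python) =====
-- # Two-staged tokenizer: stage 1 run-length-encodes the text by character class,
-- # stage 2 maps each run to tokens arithmetically ('+'-run of length m -> m//2
-- # INCR + m%2 SUMA; uppercase run of length m -> m IDs, absorbing one following
-- # lower/digit run). Equivalent to A's greedy char-by-char scan because A's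
-- # pairing of '+' and identifier tails never cross run boundaries.
--
-- def _cls(c):
--     if c.isspace():
--         return 0
--     if c == '+':
--         return 1
--     if 'A' <= c <= 'Z':
--         return 2
--     if 'a' <= c <= 'z' or '0' <= c <= '9':
--         return 3
--     return 4
--
-- def analizar_lexico(texto):
--     # stage 1: run-length encoding by class
--     runs = []
--     rest = texto
--     while rest:
--         k = _cls(rest[0])
--         j = 1
--         while j < len(rest) and _cls(rest[j]) == k:
--             j += 1
--         runs.append((k, j))
--         rest = rest[j:]
--     # stage 2: translate runs to tokens
--     tokens = []
--     prev_upper = False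
--     for k, m in runs:
--         if k == 0:
--             prev_upper = False
--         elif k == 1:
--             tokens += ["INCR"] * (m // 2) + ["SUMA"] * (m % 2)
--             prev_upper = False
--         elif k == 2:
--             tokens += ["ID"] * m
--             prev_upper = True
--         elif k == 3 and prev_upper:
--             prev_upper = False
--         else:
--             return None
--     return tokens
-- ===== Notes on version B (the rewrite author's own statement) =====
-- stated objective: alternative
-- what changed: A's single-pass greedy character scanner is replaced by a two-stage pipeline: stage 1 run-length-encodes the text by character class (space/plus/upper/lower-digit/other), stage 2 converts each run to tokens by closed-form arithmetic (a '+'-run of length m yields m//2 INCR plus m%2 SUMA, an uppercase run of length m yields m IDs and absorbs one following lower/digit run), with an error for any other run.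
import Mathlib
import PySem

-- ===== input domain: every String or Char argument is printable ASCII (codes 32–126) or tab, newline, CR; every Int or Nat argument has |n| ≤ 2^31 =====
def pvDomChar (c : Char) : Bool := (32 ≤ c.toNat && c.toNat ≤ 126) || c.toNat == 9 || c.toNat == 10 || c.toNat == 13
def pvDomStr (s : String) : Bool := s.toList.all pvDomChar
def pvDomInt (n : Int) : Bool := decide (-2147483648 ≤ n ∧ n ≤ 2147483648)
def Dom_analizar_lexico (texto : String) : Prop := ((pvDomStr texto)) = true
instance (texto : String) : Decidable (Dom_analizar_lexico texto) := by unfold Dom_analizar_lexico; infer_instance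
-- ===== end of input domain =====

-- B replaces A's greedy char-by-char scanner by a two-stage pipeline: run-length
-- encoding by character class, then closed-form run-to-token arithmetic; objective: alternative.

-- ===== PORT A =====
-- inner `while` of A's identifier branch: advance i while lowercase letter or digit
def pvAIdWhile (t : List Char) (i : Nat) : Nat :=
  if h : i < t.length ∧ (('a' ≤ t.getD i ' ' ∧ t.getD i ' ' ≤ 'z') ∨
      ('0' ≤ t.getD i ' ' ∧ t.getD i ' ' ≤ '9')) then
    pvAIdWhile t (i + 1)
  else i
termination_by t.length - i
decreasing_by cases h with | intro h1 _ => omega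

-- A's outer `while i < n` loop; fuel = n - i bounds the iteration count (fuel-0 case unreachable)
def pvALoop (t : List Char) : Nat → Nat → List String → Option (List String)
  | 0, _, acc => some acc
  | fuel + 1, i, acc =>
    if i < t.length then
      let c := t.getD i ' '
      if PySem.Chars.isspace c then
        pvALoop t fuel (i + 1) acc
      else if c = '+' then
        if i + 1 < t.length ∧ t.getD (i + 1) ' ' = '+' then
          pvALoop t fuel (i + 2) (acc ++ ["INCR"])
        else
          pvALoop t fuel (i + 1) (acc ++ ["SUMA"])
      else if 'A' ≤ c ∧ c ≤ 'Z' then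
        pvALoop t fuel (pvAIdWhile t (i + 1)) (acc ++ ["ID"])
      else none
    else some acc

def analizar_lexico (texto : String) : Option (List String) :=
  pvALoop texto.toList texto.toList.length 0 []

-- ===== PORT B =====
-- the 'a' <= c <= 'z' or '0' <= c <= '9' test of _cls
def pvLowdig (c : Char) : Bool :=
  decide (('a' ≤ c ∧ c ≤ 'z') ∨ ('0' ≤ c ∧ c ≤ '9'))

-- B's _cls: character class (0 space, 1 plus, 2 upper, 3 lower/digit, 4 other)
def pvCls (c : Char) : Nat :=
  if PySem.Chars.isspace c then 0
  else if c = '+' then 1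
  else if 'A' ≤ c ∧ c ≤ 'Z' then 2
  else if pvLowdig c = true then 3
  else 4

-- inner `while j < len(rest) and _cls(rest[j]) == k` of stage 1
def pvRunLen (rest : List Char) (k : Nat) (j : Nat) : Nat :=
  if h : j < rest.length ∧ pvCls (rest.getD j ' ') = k then pvRunLen rest k (j + 1)
  else j
termination_by rest.length - j
decreasing_by cases h with | intro h1 _ => omega

-- needed for pvRuns' termination
lemma pvRunLen_ge (rest : List Char) (k : Nat) : ∀ j, j ≤ pvRunLen rest k j := by
  intro j
  fun_induction pvRunLen rest k j with
  | case1 j h ih => omega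
  | case2 j h => omega

-- stage 1: `while rest:` — run-length encode by class, slicing the run off
def pvRuns (rest : List Char) : List (Nat × Nat) :=
  if h : rest = [] then []
  else
    let k := pvCls (rest.headD ' ')
    let j := pvRunLen rest k 1
    (k, j) :: pvRuns (rest.drop j)
termination_by rest.length
decreasing_by
  have h1 : 1 ≤ pvRunLen rest (pvCls (rest.headD ' ')) 1 := pvRunLen_ge _ _ 1
  have h2 : 0 < rest.length := List.length_pos_iff.mpr h
  simp only [List.length_drop]
  omega

-- stage 2: `for k, m in runs:` with the prev_upper flag
def pvStage2 : List (Nat × Nat) → Bool → List String → Option (List String)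
  | [], _, tokens => some tokens
  | (k, m) :: rs, prev, tokens =>
    if k = 0 then pvStage2 rs false tokens
    else if k = 1 then
      pvStage2 rs false (tokens ++ (List.replicate (m / 2) "INCR" ++ List.replicate (m % 2) "SUMA"))
    else if k = 2 then pvStage2 rs true (tokens ++ List.replicate m "ID")
    else if k = 3 ∧ prev = true then pvStage2 rs false tokens
    else none

def analizar_lexico_alt (texto : String) : Option (List String) :=
  pvStage2 (pvRuns texto.toList) false []

-- ===== PRECONDITION & SPEC =====
def Spec_analizar_lexico (texto : String) (out : Option (List String)) : Prop := out = analizar_lexico_alt texto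
instance (texto : String) (out : Option (List String)) : Decidable (Spec_analizar_lexico texto out) := by unfold Spec_analizar_lexico; infer_instance

-- ===== CLAIM (what is proved, stated in full; the proofs are below) =====
def Claim_equal_analizar_lexico : Prop := ∀ (texto : String), Dom_analizar_lexico texto → Spec_analizar_lexico texto (analizar_lexico texto)

-- ===== LEMMAS AND PROOFS =====

-- reference lexer both ports are reduced to: structural recursion on the char list
def pvLex : List Char → Option (List String)
  | [] => some []
  | c :: cs =>
    if PySem.Chars.isspace c then pvLex cs
    else if c = '+' then
      if cs.headD ' ' = '+' then (pvLex cs.tail).map (fun ts => "INCR" :: ts)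
      else (pvLex cs).map (fun ts => "SUMA" :: ts)
    else if 'A' ≤ c ∧ c ≤ 'Z' then
      (pvLex (cs.dropWhile pvLowdig)).map (fun ts => "ID" :: ts)
    else none
termination_by l => l.length
decreasing_by
  all_goals try simp [List.length_tail]
  all_goals have := List.length_dropWhile_le pvLowdig cs
  all_goals omega

-- character-class facts
lemma pv_char_le {a b : Char} : a ≤ b ↔ a.toNat ≤ b.toNat := by
  rw [Char.le_def, UInt32.le_iff_toNat_le]; rfl

lemma pv_upper_bounds {c : Char} (h : 'A' ≤ c ∧ c ≤ 'Z') : 65 ≤ c.toNat ∧ c.toNat ≤ 90 := by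
  obtain ⟨h1, h2⟩ := h
  rw [pv_char_le] at h1 h2
  exact ⟨h1, h2⟩

lemma pv_lowdig_bounds {c : Char} (h : pvLowdig c = true) :
    (97 ≤ c.toNat ∧ c.toNat ≤ 122) ∨ (48 ≤ c.toNat ∧ c.toNat ≤ 57) := by
  unfold pvLowdig at h
  rcases of_decide_eq_true h with ⟨h1, h2⟩ | ⟨h1, h2⟩ <;>
    rw [pv_char_le] at h1 h2
  · exact Or.inl ⟨h1, h2⟩
  · exact Or.inr ⟨h1, h2⟩

lemma pv_upper_not_space {c : Char} (h : 'A' ≤ c ∧ c ≤ 'Z') : PySem.Chars.isspace c = false := by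
  have hb := pv_upper_bounds h
  simp [PySem.Chars.isspace]
  omega

lemma pv_lowdig_not_space {c : Char} (h : pvLowdig c = true) : PySem.Chars.isspace c = false := by
  have hb := pv_lowdig_bounds h
  simp [PySem.Chars.isspace]
  omega

lemma pv_upper_ne_plus {c : Char} (h : 'A' ≤ c ∧ c ≤ 'Z') : c ≠ '+' := by
  rintro rfl
  exact absurd h (by decide)

lemma pv_lowdig_ne_plus {c : Char} (h : pvLowdig c = true) : c ≠ '+' := by
  rintro rfl
  exact absurd h (by decide)

lemma pv_lowdig_not_upper {c : Char} (h : pvLowdig c = true) : ¬ ('A' ≤ c ∧ c ≤ 'Z') := by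
  intro hu
  have h1 := pv_lowdig_bounds h
  have h2 := pv_upper_bounds hu
  omega

-- pvCls characterisations
lemma pv_cls0 {c : Char} : pvCls c = 0 ↔ PySem.Chars.isspace c = true := by
  unfold pvCls
  by_cases h1 : PySem.Chars.isspace c = true
  · simp [h1]
  · rw [if_neg (by simp [h1])]
    split_ifs <;> simp [h1]

lemma pv_cls1 {c : Char} : pvCls c = 1 ↔ c = '+' := by
  unfold pvCls
  by_cases h2 : c = '+'
  · subst h2
    rw [if_neg (by decide), if_pos rfl]
    simp
  · split_ifs <;> simp [h2]

lemma pv_cls2 {c : Char} : pvCls c = 2 ↔ ('A' ≤ c ∧ c ≤ 'Z') := by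
  unfold pvCls
  by_cases hA : 'A' ≤ c ∧ c ≤ 'Z'
  · rw [if_neg (by simp [pv_upper_not_space hA]), if_neg (pv_upper_ne_plus hA), if_pos hA]
    simp [hA]
  · split_ifs <;> simp [hA]

lemma pv_cls3 {c : Char} : pvCls c = 3 ↔ pvLowdig c = true := by
  unfold pvCls
  by_cases h : pvLowdig c = true
  · rw [if_neg (by simp [pv_lowdig_not_space h]), if_neg (pv_lowdig_ne_plus h),
      if_neg (pv_lowdig_not_upper h), if_pos h]
    simp [h]
  · split_ifs <;> simp [h]

lemma pv_cls4 {c : Char} (h : pvCls c = 4) :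
    PySem.Chars.isspace c = false ∧ c ≠ '+' ∧ ¬ ('A' ≤ c ∧ c ≤ 'Z') ∧ pvLowdig c = false := by
  unfold pvCls at h
  split_ifs at h with h1 h2 h3 h4 <;> simp_all

-- ===== A-side: pvALoop computes pvLex =====

lemma pv_drop_cons (t : List Char) (i : Nat) (hi : i < t.length) :
    t.drop i = t.getD i ' ' :: t.drop (i + 1) := by
  rw [List.getD_eq_getElem t ' ' hi]
  exact List.drop_eq_getElem_cons hi

lemma pvAIdWhile_drop (t : List Char) : ∀ i, t.drop (pvAIdWhile t i) = (t.drop i).dropWhile pvLowdig := by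
  intro i
  fun_induction pvAIdWhile t i with
  | case1 i h ih =>
    obtain ⟨hi, hc⟩ := h
    have hd : t.drop i = t[i] :: t.drop (i + 1) := List.drop_eq_getElem_cons hi
    have hld : pvLowdig (t.getD i ' ') = true := by
      unfold pvLowdig; exact decide_eq_true hc
    rw [ih, hd, List.dropWhile_cons]
    have : t.getD i ' ' = t[i] := List.getD_eq_getElem t ' ' hi
    rw [this] at hld
    simp [hld]
  | case2 i h =>
    by_cases hi : i < t.length
    · have hd : t.drop i = t[i] :: t.drop (i + 1) := List.drop_eq_getElem_cons hi
      have hld : pvLowdig (t.getD i ' ') = false := by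
        unfold pvLowdig
        simp only [decide_eq_false_iff_not]
        intro hc; exact h ⟨hi, hc⟩
      have : t.getD i ' ' = t[i] := List.getD_eq_getElem t ' ' hi
      rw [this] at hld
      rw [hd, List.dropWhile_cons]
      simp [hld]
    · have hnil : t.drop i = [] := List.drop_eq_nil_of_le (by omega)
      rw [hnil]
      rfl

lemma pvAIdWhile_ge (t : List Char) : ∀ i, i ≤ pvAIdWhile t i := by
  intro i
  fun_induction pvAIdWhile t i with
  | case1 i h ih => omega
  | case2 i h => omega

lemma pv_map_acc (o : Option (List String)) (acc ext : List String) :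
    (o.map (fun ts => ext ++ ts)).map (fun ts => acc ++ ts) = o.map (fun ts => (acc ++ ext) ++ ts) := by
  cases o <;> simp

lemma pvALoop_lex (t : List Char) : ∀ fuel i acc, t.length - i ≤ fuel →
    pvALoop t fuel i acc = (pvLex (t.drop i)).map (fun ts => acc ++ ts) := by
  intro fuel
  induction fuel with
  | zero =>
    intro i acc hf
    have : t.drop i = [] := List.drop_eq_nil_of_le (by omega)
    simp [pvALoop, this, pvLex]
  | succ fuel ih =>
    intro i acc hf
    rw [pvALoop]
    by_cases hi : i < t.length
    · rw [if_pos hi]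
      have hd := pv_drop_cons t i hi
      rw [hd, pvLex]
      by_cases hsp : PySem.Chars.isspace (t.getD i ' ') = true
      · rw [if_pos hsp, if_pos hsp]
        exact ih (i + 1) acc (by omega)
      · rw [if_neg hsp, if_neg hsp]
        by_cases hp : t.getD i ' ' = '+'
        · rw [if_pos hp, if_pos hp]
          by_cases hn : i + 1 < t.length ∧ t.getD (i + 1) ' ' = '+'
          · rw [if_pos hn]
            have hd2 := pv_drop_cons t (i + 1) hn.1
            have hh : (t.drop (i + 1)).headD ' ' = '+' := by
              rw [hd2]
              simp only [List.headD_cons]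
              exact hn.2
            rw [if_pos hh]
            have htail : (t.drop (i + 1)).tail = t.drop (i + 2) := by
              rw [hd2, List.tail_cons]
            rw [htail, ih (i + 2) (acc ++ ["INCR"]) (by omega)]
            cases pvLex (t.drop (i + 2)) <;> simp
          · rw [if_neg hn]
            have hh : ¬ (t.drop (i + 1)).headD ' ' = '+' := by
              by_cases hl1 : i + 1 < t.length
              · rw [pv_drop_cons t (i + 1) hl1]
                simp only [List.headD_cons]
                intro hcon
                exact hn ⟨hl1, hcon⟩
              · rw [List.drop_eq_nil_of_le (by omega)]
                simp
            rw [if_neg hh, ih (i + 1) (acc ++ ["SUMA"]) (by omega)]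
            cases pvLex (t.drop (i + 1)) <;> simp
        · rw [if_neg hp, if_neg hp]
          by_cases hA : 'A' ≤ t.getD i ' ' ∧ t.getD i ' ' ≤ 'Z'
          · rw [if_pos hA, if_pos hA]
            rw [ih (pvAIdWhile t (i + 1)) (acc ++ ["ID"])
              (by have := pvAIdWhile_ge t (i + 1); omega)]
            rw [pvAIdWhile_drop t (i + 1)]
            cases pvLex ((t.drop (i + 1)).dropWhile pvLowdig) <;> simp
          · rw [if_neg hA, if_neg hA]
            simp
    · have hnil : t.drop i = [] := List.drop_eq_nil_of_le (by omega)
      simp [hi, hnil, pvLex]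

-- ===== B-side: pvStage2 ∘ pvRuns computes pvLex =====

lemma pvRunLen_spec (rest : List Char) (k : Nat) : ∀ j,
    pvRunLen rest k j = j + ((rest.drop j).takeWhile (fun c => pvCls c == k)).length := by
  intro j
  fun_induction pvRunLen rest k j with
  | case1 j h ih =>
    obtain ⟨hj, hc⟩ := h
    have hd : rest.drop j = rest[j] :: rest.drop (j + 1) := List.drop_eq_getElem_cons hj
    have hg : rest.getD j ' ' = rest[j] := List.getD_eq_getElem rest ' ' hj
    rw [ih, hd, List.takeWhile_cons]
    rw [hg] at hc
    simp [hc]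
    omega
  | case2 j h =>
    by_cases hj : j < rest.length
    · have hd : rest.drop j = rest[j] :: rest.drop (j + 1) := List.drop_eq_getElem_cons hj
      have hg : rest.getD j ' ' = rest[j] := List.getD_eq_getElem rest ' ' hj
      have hc : ¬ pvCls rest[j] = k := fun hc => h ⟨hj, by rw [hg]; exact hc⟩
      rw [hd, List.takeWhile_cons]
      simp [hc]
    · rw [List.drop_eq_nil_of_le (by omega)]
      simp

lemma pv_drop_takeWhile_length (p : Char → Bool) : ∀ (l : List Char),
    l.drop (l.takeWhile p).length = l.dropWhile p := by
  intro l
  induction l with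
  | nil => rfl
  | cons a l ih =>
    rw [List.takeWhile_cons, List.dropWhile_cons]
    by_cases hp : p a = true <;> simp [hp, ih]

-- first run of a nonempty list
lemma pvRuns_cons (c : Char) (cs : List Char) :
    pvRuns (c :: cs) = (pvCls c, ((c :: cs).takeWhile (fun x => pvCls x == pvCls c)).length) ::
      pvRuns ((c :: cs).dropWhile (fun x => pvCls x == pvCls c)) := by
  rw [pvRuns]
  simp only [reduceDIte, List.headD_cons, List.cons_ne_nil, dite_false]
  have h1 : pvRunLen (c :: cs) (pvCls c) 1 =
      ((c :: cs).takeWhile (fun x => pvCls x == pvCls c)).length := by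
    rw [pvRunLen_spec]
    rw [List.takeWhile_cons]
    simp
    omega
  rw [h1, pv_drop_takeWhile_length]

-- pvLex run lemmas
lemma pvLex_ws_run : ∀ (r l : List Char), (∀ c ∈ r, PySem.Chars.isspace c = true) →
    pvLex (r ++ l) = pvLex l := by
  intro r
  induction r with
  | nil => intro l _; simp
  | cons c r ih =>
    intro l hr
    have hc : PySem.Chars.isspace c = true := hr c (by simp)
    rw [List.cons_append, pvLex, if_pos hc]
    exact ih l (fun x hx => hr x (by simp [hx]))

lemma pvLex_plus_run : ∀ (n : Nat) (r l : List Char), r.length = n → (∀ c ∈ r, c = '+') →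
    l.headD ' ' ≠ '+' →
    pvLex (r ++ l) = (pvLex l).map (fun ts =>
      List.replicate (r.length / 2) "INCR" ++ List.replicate (r.length % 2) "SUMA" ++ ts) := by
  intro n
  induction n using Nat.strong_induction_on with
  | _ n ih =>
    intro r l hn hr hl
    match r, hn with
    | [], _ =>
      simp only [List.nil_append, List.length_nil]
      cases pvLex l <;> simp
    | [c], _ =>
      have hc : c = '+' := hr c (by simp)
      subst hc
      rw [List.cons_append, List.nil_append, pvLex]
      rw [if_neg (by decide), if_pos rfl, if_neg hl]
      cases pvLex l <;> simp
    | c :: c' :: r', hn =>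
      have hc : c = '+' := hr c (by simp)
      have hc' : c' = '+' := hr c' (by simp)
      subst hc; subst hc'
      have hstep : (('+' :: '+' :: r') : List Char) ++ l = '+' :: '+' :: (r' ++ l) := by simp
      rw [hstep, pvLex]
      rw [if_neg (by decide), if_pos rfl]
      rw [if_pos (by rfl : (('+' :: (r' ++ l)).headD ' ') = '+')]
      simp only [List.tail_cons]
      rw [ih r'.length (by subst hn; simp) r' l rfl
        (fun x hx => hr x (by simp [hx])) hl]
      have e1 : ('+' :: '+' :: r').length / 2 = r'.length / 2 + 1 := by simp; omega
      have e2 : ('+' :: '+' :: r').length % 2 = r'.length % 2 := by simp; omega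
      rw [e1, e2]
      cases pvLex l <;> simp [List.replicate_succ]

lemma pvLex_upper_run : ∀ (r l : List Char), r ≠ [] → (∀ c ∈ r, 'A' ≤ c ∧ c ≤ 'Z') →
    pvLex (r ++ l) = (pvLex (l.dropWhile pvLowdig)).map (fun ts =>
      List.replicate r.length "ID" ++ ts) := by
  intro r
  induction r with
  | nil => intro l h; exact absurd rfl h
  | cons c r ih =>
    intro l _ hr
    have hc : 'A' ≤ c ∧ c ≤ 'Z' := hr c (by simp)
    rw [List.cons_append, pvLex]
    rw [if_neg (by simp [pv_upper_not_space hc]), if_neg (pv_upper_ne_plus hc), if_pos hc]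
    cases r with
    | nil =>
      simp only [List.nil_append]
      cases pvLex (l.dropWhile pvLowdig) <;> simp
    | cons d r' =>
      have hd : 'A' ≤ d ∧ d ≤ 'Z' := hr d (by simp)
      have hdld : pvLowdig d = false := by
        by_contra hcon
        simp only [Bool.not_eq_false] at hcon
        exact pv_lowdig_not_upper hcon hd
      have : ((d :: r') ++ l).dropWhile pvLowdig = (d :: r') ++ l := by
        rw [List.cons_append, List.dropWhile_cons, hdld]
        simp
      rw [this, ih l (by simp) (fun x hx => hr x (by simp [hx]))]
      cases pvLex (l.dropWhile pvLowdig) <;> simp [List.replicate_succ]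

lemma pvLex_lowdig_head (c : Char) (cs : List Char) (h : pvLowdig c = true) :
    pvLex (c :: cs) = none := by
  rw [pvLex]
  rw [if_neg (by simp [pv_lowdig_not_space h]), if_neg (pv_lowdig_ne_plus h),
    if_neg (pv_lowdig_not_upper h)]

lemma pvLex_other_head (c : Char) (cs : List Char) (h : pvCls c = 4) :
    pvLex (c :: cs) = none := by
  obtain ⟨h1, h2, h3, _⟩ := pv_cls4 h
  rw [pvLex]
  rw [if_neg (by simp [h1]), if_neg h2, if_neg h3]

-- if the head is not lower/digit, the prev-flag dropWhile is the identity
lemma pv_if_drop (prev : Bool) (c : Char) (cs : List Char) (h : pvLowdig c = false) :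
    (if prev then (c :: cs).dropWhile pvLowdig else (c :: cs)) = c :: cs := by
  cases prev <;> simp [h]

lemma pv_dropWhile_head_false (p : Char → Bool) : ∀ (l : List Char) (a : Char) (b : List Char),
    l.dropWhile p = a :: b → p a = false := by
  intro l
  induction l with
  | nil => intro a b h; simp at h
  | cons x xs ih =>
    intro a b h
    rw [List.dropWhile_cons] at h
    by_cases hx : p x = true
    · simp only [hx, if_pos rfl] at h
      exact ih a b h
    · simp only [hx] at h
      simp only [Bool.false_eq_true, if_neg (by simp : ¬ False)] at h
      cases h
      simpa using hx

lemma pvStage2_lex : ∀ (N : Nat) (l : List Char), l.length ≤ N → ∀ (prev : Bool) (acc : List String),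
    pvStage2 (pvRuns l) prev acc =
      (pvLex (if prev then l.dropWhile pvLowdig else l)).map (fun ts => acc ++ ts) := by
  intro N
  induction N with
  | zero =>
    intro l hl prev acc
    have : l = [] := List.length_eq_zero_iff.mp (by omega)
    subst this
    rw [pvRuns]
    cases prev <;> simp [pvStage2, pvLex]
  | succ N ih =>
    intro l hl prev acc
    cases l with
    | nil =>
      rw [pvRuns]
      cases prev <;> simp [pvStage2, pvLex]
    | cons c cs =>
      rw [pvRuns_cons]
      set p := fun x => pvCls x == pvCls c with hp
      set r := (c :: cs).takeWhile p with hrdef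
      set suf := (c :: cs).dropWhile p with hsdef
      have hsplit : r ++ suf = c :: cs := List.takeWhile_append_dropWhile
      have hrne : r ≠ [] := by
        rw [hrdef, List.takeWhile_cons]
        simp [hp]
      have hrlen : 1 ≤ r.length := by
        cases hre : r with
        | nil => exact absurd hre hrne
        | cons a b => simp
      have hlen : r.length + suf.length = cs.length + 1 := by
        have := congrArg List.length hsplit
        simpa using this
      have hsufN : suf.length ≤ N := by
        have : (c :: cs).length ≤ N + 1 := hl
        simp at this
        omega
      have hmem : ∀ x ∈ r, pvCls x = pvCls c := by
        intro x hx
        have h2 : p x = true := List.mem_takeWhile_imp hx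
        simpa [hp] using h2
      by_cases hsp : PySem.Chars.isspace c = true
      · have hk : pvCls c = 0 := pv_cls0.mpr hsp
        rw [pvStage2]
        simp only [hk, reduceIte]
        rw [ih suf hsufN false acc]
        simp only [Bool.false_eq_true, reduceIte]
        have hld : pvLowdig c = false := by
          by_contra hcon
          simp only [Bool.not_eq_false] at hcon
          rw [pv_lowdig_not_space hcon] at hsp
          exact absurd hsp (by simp)
        rw [pv_if_drop prev c cs hld]
        conv_rhs => rw [← hsplit]
        rw [pvLex_ws_run r suf (fun x hx => pv_cls0.mp (hk ▸ hmem x hx))]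
      · by_cases hpl : c = '+'
        · have hk : pvCls c = 1 := pv_cls1.mpr hpl
          rw [pvStage2]
          simp only [hk, reduceIte]
          rw [ih suf hsufN false
            (acc ++ (List.replicate (r.length / 2) "INCR" ++ List.replicate (r.length % 2) "SUMA"))]
          simp only [Bool.false_eq_true, reduceIte]
          have hld : pvLowdig c = false := by
            by_contra hcon
            simp only [Bool.not_eq_false] at hcon
            exact pv_lowdig_ne_plus hcon hpl
          rw [pv_if_drop prev c cs hld]
          conv_rhs => rw [← hsplit]
          have hsufhead : suf.headD ' ' ≠ '+' := by
            intro hcon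
            cases hse : suf with
            | nil =>
              rw [hse] at hcon
              exact absurd hcon (by decide)
            | cons a b =>
              have hpa : p a = false :=
                pv_dropWhile_head_false p (c :: cs) a b (by rw [← hsdef]; exact hse)
              rw [hse] at hcon
              simp only [List.headD_cons] at hcon
              rw [hcon, hp] at hpa
              simp only [hk] at hpa
              have : pvCls '+' = 1 := pv_cls1.mpr rfl
              rw [this] at hpa
              simp at hpa
          rw [pvLex_plus_run r.length r suf rfl
            (fun x hx => pv_cls1.mp (hk ▸ hmem x hx)) hsufhead]
          rw [pv_map_acc]
          cases pvLex suf <;> simp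
        · by_cases hA : 'A' ≤ c ∧ c ≤ 'Z'
          · have hk : pvCls c = 2 := pv_cls2.mpr hA
            rw [pvStage2]
            simp only [hk, reduceIte]
            rw [ih suf hsufN true (acc ++ List.replicate r.length "ID")]
            simp only [reduceIte]
            have hld : pvLowdig c = false := by
              by_contra hcon
              simp only [Bool.not_eq_false] at hcon
              exact pv_lowdig_not_upper hcon hA
            rw [pv_if_drop prev c cs hld]
            conv_rhs => rw [← hsplit]
            rw [pvLex_upper_run r suf hrne (fun x hx => pv_cls2.mp (hk ▸ hmem x hx))]
            rw [pv_map_acc]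
            cases pvLex (suf.dropWhile pvLowdig) <;> simp
          · by_cases hld : pvLowdig c = true
            · have hk : pvCls c = 3 := pv_cls3.mpr hld
              have hpeq : p = pvLowdig := by
                funext x
                rw [hp, hk]
                by_cases hx : pvLowdig x = true
                · simp [hx, pv_cls3.mpr hx]
                · simp only [Bool.not_eq_true] at hx
                  rw [hx]
                  simp only [beq_eq_false_iff_ne, ne_eq]
                  intro hcon
                  rw [pv_cls3.mp hcon] at hx
                  exact absurd hx (by simp)
              rw [pvStage2]
              simp only [hk, reduceIte, eq_self_iff_true, true_and]
              cases prev with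
              | true =>
                rw [if_pos rfl]
                rw [ih suf hsufN false acc]
                simp only [Bool.false_eq_true, reduceIte]
                rw [← hpeq, ← hsdef]
                simp
              | false =>
                rw [if_neg (by simp)]
                simp only [Bool.false_eq_true, reduceIte]
                rw [pvLex_lowdig_head c cs hld]
                simp
            · have hk : pvCls c = 4 := by
                unfold pvCls
                rw [if_neg (by simp [hsp]), if_neg hpl, if_neg hA, if_neg (by simp [hld])]
              rw [pvStage2]
              simp only [hk, reduceIte]
              rw [if_neg (by simp)]
              rw [pv_if_drop prev c cs (by simpa using hld)]
              rw [pvLex_other_head c cs hk]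
              simp

-- ===== VERDICT (by name: the statement is the Claim_ definition above) =====
theorem analizar_lexico_spec : Claim_equal_analizar_lexico := by
  intro texto _
  unfold Spec_analizar_lexico analizar_lexico analizar_lexico_alt
  rw [pvALoop_lex texto.toList texto.toList.length 0 [] (by omega)]
  rw [pvStage2_lex texto.toList.length texto.toList (le_refl _) false []]
  simp
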